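-- pv_equiv track=rewrite | github.com/jumon/himitsu | himitsu/steganography.py | resolve_collision
-- ===== SOURCE A (Python) =====
-- from typing import List
--
-- def resolve_collision(tokens: List[str]) -> List[int]:
--     indices = []
--     for i in range(len(tokens)):
--         for j in range(len(tokens)):
--             if i == j:
--                 continue
--             if tokens[j].startswith(tokens[i]):
--                 break
--         else:
--             indices.append(i)
--     return indices
-- ===== SOURCE B (Python) =====
-- from typing import List
--
-- def resolve_collision(tokens: List[str]) -> List[int]:
--     count = {}
--     for t in tokens:
--         count[t] = count.get(t, 0) + 1
--     distinct = sorted(count)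
--     keep = set()
--     for k, t in enumerate(distinct):
--         if count[t] == 1 and not (k + 1 < len(distinct) and distinct[k + 1].startswith(t)):
--             keep.add(t)
--     return [i for i, t in enumerate(tokens) if t in keep]
-- ===== Notes on version B (the rewrite author's own statement) =====
-- stated objective: faster
-- what changed: Instead of testing every pair of tokens with startswith, B counts occurrences in one dict pass and sorts the distinct tokens once, so a token is a prefix of another iff its count exceeds 1 or its immediate lexicographic successor among the distinct tokens starts with it; one final enumerate pass collects the surviving indices.
import Mathlib
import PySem

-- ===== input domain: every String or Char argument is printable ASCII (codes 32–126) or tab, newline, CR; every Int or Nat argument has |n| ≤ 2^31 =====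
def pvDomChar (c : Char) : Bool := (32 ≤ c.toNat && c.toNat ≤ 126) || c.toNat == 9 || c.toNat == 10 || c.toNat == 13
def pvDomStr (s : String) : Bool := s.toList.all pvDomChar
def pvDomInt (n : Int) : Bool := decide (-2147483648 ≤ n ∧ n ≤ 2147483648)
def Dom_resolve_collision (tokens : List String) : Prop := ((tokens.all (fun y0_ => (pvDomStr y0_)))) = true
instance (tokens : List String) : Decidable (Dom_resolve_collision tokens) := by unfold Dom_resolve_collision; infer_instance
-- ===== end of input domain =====

-- B replaces A's O(n^2) all-pairs startswith scan by counting duplicates in a dict and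
-- sorting the distinct tokens once, so that "is a prefix of another token" becomes a
-- check against the immediate lexicographic successor (objective: faster).

-- ===== PORT A =====
-- inner loop 'for j in range(len(tokens)): …' with break/else; returns true iff it broke
def pvInnerA (tokens : List String) (i : Int) : List Int → Bool
  | [] => false
  | j :: js =>
    if i == j then pvInnerA tokens i js
    else if PySem.Str.startswith (PySem.List.pyGetD tokens j "") (PySem.List.pyGetD tokens i "") then
      true
    else pvInnerA tokens i js

def resolve_collision (tokens : List String) : List Int :=
  (PySem.List.pyRange 0 (PySem.List.len tokens) 1).foldl
    (fun indices i =>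
      if pvInnerA tokens i (PySem.List.pyRange 0 (PySem.List.len tokens) 1) then indices
      else indices ++ [i]) []

-- ===== PORT B =====
-- count = {}; for t in tokens: count[t] = count.get(t, 0) + 1
def pvCount (tokens : List String) : PySem.Dict String Int :=
  tokens.foldl (fun d t => d.insert t (d.getD t 0 + 1)) PySem.Dict.empty

-- distinct = sorted(count)
def pvDistinct (tokens : List String) : List String :=
  PySem.List.sorted (pvCount tokens).keys (fun x => x)

-- the 'if' condition of the keep loop; count[t] is a lookup of a key always present
-- (every t in distinct is a key of count), ported as getD with default 0
def pvKeepCond (count : PySem.Dict String Int) (distinct : List String) (p : Int × String) : Bool :=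
  count.getD p.2 0 == 1 &&
    !(decide (p.1 + 1 < PySem.List.len distinct) &&
      PySem.Str.startswith (PySem.List.pyGetD distinct (p.1 + 1) "") p.2)

-- keep = set(); for k, t in enumerate(distinct): if …: keep.add(t)
def pvKeep (tokens : List String) : PySem.Set String :=
  (PySem.List.enumerate (pvDistinct tokens)).foldl
    (fun s p => if pvKeepCond (pvCount tokens) (pvDistinct tokens) p then PySem.Set.add s p.2 else s)
    PySem.Set.empty

-- return [i for i, t in enumerate(tokens) if t in keep]
def resolve_collision_alt (tokens : List String) : List Int :=
  (PySem.List.enumerate tokens).foldl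
    (fun acc p => if PySem.Set.contains (pvKeep tokens) p.2 then acc ++ [p.1] else acc) []

-- ===== PRECONDITION & SPEC =====
def Spec_resolve_collision (tokens : List String) (out : List Int) : Prop := out = resolve_collision_alt tokens
instance (tokens : List String) (out : List Int) : Decidable (Spec_resolve_collision tokens out) := by unfold Spec_resolve_collision; infer_instance

-- ===== CLAIM (what is proved, stated in full; the proofs are below) =====
def Claim_equal_resolve_collision : Prop := ∀ (tokens : List String), Dom_resolve_collision tokens → Spec_resolve_collision tokens (resolve_collision tokens)

-- ===== LEMMAS AND PROOFS =====

-- "token t collides in tokens": t occurs twice, or t is a proper prefix of another token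
def pvColl (tokens : List String) (t : String) : Prop :=
  1 < tokens.count t ∨ ∃ u ∈ tokens, u ≠ t ∧ t.toList <+: u.toList

-- A's inner loop breaks iff some index j ≠ i carries a token extending tokens[i]
lemma pvInnerA_iff (tokens : List String) (i : Int) (js : List Int) :
    pvInnerA tokens i js = true ↔
      ∃ j ∈ js, i ≠ j ∧
        PySem.Str.startswith (PySem.List.pyGetD tokens j "") (PySem.List.pyGetD tokens i "") = true := by
  induction js with
  | nil => simp [pvInnerA]
  | cons j js ih =>
    by_cases hij : i = j
    · subst hij
      simp [pvInnerA, ih]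
    · by_cases hs : PySem.Str.startswith (PySem.List.pyGetD tokens j "")
          (PySem.List.pyGetD tokens i "") = true
      · simp [pvInnerA, hij]
        tauto
      · simp [pvInnerA, hij, ih]

-- a proper prefix is lexicographically smaller
lemma pvPrefix_lex {cs ds : List Char} (hp : cs <+: ds) (hne : cs ≠ ds) :
    List.Lex (· < ·) cs ds := by
  induction cs generalizing ds with
  | nil =>
    cases ds with
    | nil => exact absurd rfl hne
    | cons d ds => exact List.Lex.nil
  | cons c cs ih =>
    obtain ⟨r, rfl⟩ := hp
    apply List.Lex.cons
    apply ih ⟨r, rfl⟩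
    intro h
    exact hne (congrArg (c :: ·) h)

-- a prefix of v that is lexicographically between s and v: s is a prefix of u too
lemma pvPrefix_between {s u v : List Char} (h1 : List.Lex (· < ·) s u)
    (h2 : List.Lex (· < ·) u v) (hp : s <+: v) : s <+: u := by
  induction h1 generalizing v with
  | nil => exact List.nil_prefix
  | @rel a l b l' hab =>
    obtain ⟨r, rfl⟩ := hp
    cases h2 with
    | rel h => exact absurd h (lt_asymm hab)
    | cons h => exact absurd rfl (ne_of_gt hab)
  | @cons a l l' hll ih =>
    obtain ⟨r, rfl⟩ := hp
    cases h2 with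
    | rel h => exact absurd h (lt_irrefl a)
    | cons h =>
      exact List.cons_prefix_cons.mpr ⟨rfl, ih h (List.prefix_append l r)⟩

-- two distinct positions holding the same token give multiplicity ≥ 2
lemma pvCount_two_aux (l : List String) (t : String) (i j : Nat) (hi : i < l.length)
    (hj : j < l.length) (hij : i < j) (h1 : l[i] = t) (h2 : l[j] = t) : 1 < l.count t := by
  have hsplit : l.take (i + 1) ++ l.drop (i + 1) = l := List.take_append_drop _ _
  have hmem1 : t ∈ l.take (i + 1) := by
    have hi' : i < (l.take (i + 1)).length := by simp; omega
    have h3 : (l.take (i + 1))[i]'hi' = t := by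
      have h4 : (l.take (i + 1))[i]'hi' = l[i] := List.getElem_take
      rw [h4, h1]
    rw [← h3]
    exact List.getElem_mem hi'
  have hmem2 : t ∈ l.drop (i + 1) := by
    have hj' : j - (i + 1) < (l.drop (i + 1)).length := by simp; omega
    have h3 : (l.drop (i + 1))[j - (i + 1)]'hj' = t := by
      have h4 : (l.drop (i + 1))[j - (i + 1)]'hj' =
          l[(i + 1) + (j - (i + 1))]'(by omega) := List.getElem_drop
      rw [h4]
      simp only [show (i + 1) + (j - (i + 1)) = j from by omega]
      exact h2
    rw [← h3]
    exact List.getElem_mem hj'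
  have c1 : 0 < (l.take (i + 1)).count t := List.count_pos_iff.mpr hmem1
  have c2 : 0 < (l.drop (i + 1)).count t := List.count_pos_iff.mpr hmem2
  have hc : l.count t = (l.take (i + 1)).count t + (l.drop (i + 1)).count t := by
    conv_lhs => rw [← hsplit]
    rw [List.count_append]
  omega

lemma pvCount_two (l : List String) (t : String) (i j : Nat) (hi : i < l.length)
    (hj : j < l.length) (hij : i ≠ j) (h1 : l[i] = t) (h2 : l[j] = t) : 1 < l.count t := by
  rcases Nat.lt_or_ge i j with h | h
  · exact pvCount_two_aux l t i j hi hj h h1 h2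
  · exact pvCount_two_aux l t j i hj hi (by omega) h2 h1

-- multiplicity ≥ 2 of l[k] gives a second position
lemma pvOther_of_count (l : List String) (t : String) (k : Nat) (hk : k < l.length)
    (hkv : l[k] = t) (h : 1 < l.count t) : ∃ j, ∃ hj : j < l.length, j ≠ k ∧ l[j] = t := by
  have hdrop : t :: l.drop (k + 1) = l.drop k := by
    rw [← hkv]; exact List.getElem_cons_drop hk
  have hsplit : l.take k ++ t :: l.drop (k + 1) = l := by
    rw [hdrop]; exact List.take_append_drop _ _
  have hcnt : l.count t = (l.take k).count t + ((t :: l.drop (k + 1)).count t) := by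
    conv_lhs => rw [← hsplit]
    rw [List.count_append]
  have hcons : (t :: l.drop (k + 1)).count t = (l.drop (k + 1)).count t + 1 := by
    simp
  by_cases hmem : t ∈ l.take k
  · obtain ⟨j, hj, hjv⟩ := List.mem_iff_getElem.mp hmem
    have hjk : j < k := by have := hj; simp at this; omega
    have hjlen : j < l.length := by omega
    refine ⟨j, hjlen, by omega, ?_⟩
    rw [← hjv]
    exact (List.getElem_take).symm
  · have h0 : (l.take k).count t = 0 := List.count_eq_zero.mpr hmem
    have hmem2 : t ∈ l.drop (k + 1) := by
      apply List.count_pos_iff.mp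
      omega
    obtain ⟨j, hj, hjv⟩ := List.mem_iff_getElem.mp hmem2
    have hjlen : (k + 1) + j < l.length := by have := hj; simp at this; omega
    refine ⟨(k + 1) + j, hjlen, by omega, ?_⟩
    rw [← hjv]
    exact (List.getElem_drop).symm

-- the A-side existence over OTHER indices, phrased on the values
lemma pvExists_index_iff (l : List String) (k : Nat) (hk : k < l.length) :
    (∃ j, ∃ hj : j < l.length, j ≠ k ∧ l[k].toList <+: l[j].toList) ↔ pvColl l l[k] := by
  constructor
  · rintro ⟨j, hj, hjk, hpre⟩
    by_cases he : l[j] = l[k]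
    · exact Or.inl (pvCount_two l l[k] j k hj hk hjk he rfl)
    · exact Or.inr ⟨l[j], List.getElem_mem hj, he, hpre⟩
  · rintro (hc | ⟨u, hu, hne, hpre⟩)
    · obtain ⟨j, hj, hjk, hjv⟩ := pvOther_of_count l l[k] k hk rfl hc
      exact ⟨j, hj, hjk, by rw [hjv]⟩
    · obtain ⟨j, hj, hjv⟩ := List.mem_iff_getElem.mp hu
      refine ⟨j, hj, ?_, by rw [hjv]; exact hpre⟩
      intro h
      subst h
      exact hne (by rw [hjv])

-- membership through B's conditional-add loop
lemma pvMem_foldl_add_if (q : Int × String → Bool) (l : List (Int × String))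
    (s : PySem.Set String) (x : String) :
    (x ∈ l.foldl (fun s p => if q p then PySem.Set.add s p.2 else s) s) ↔
      x ∈ s ∨ ∃ p ∈ l, q p = true ∧ p.2 = x := by
  induction l generalizing s with
  | nil => simp
  | cons p l ih =>
    rw [List.foldl_cons]
    by_cases hq : q p = true
    · rw [if_pos hq, ih]
      simp only [PySem.Set.mem_add, List.exists_mem_cons_iff, hq]
      tauto
    · rw [if_neg hq, ih]
      simp only [List.exists_mem_cons_iff, hq]
      tauto

-- pvCount is Counter(tokens)
lemma pvCount_eq (tokens : List String) : pvCount tokens = PySem.Dict.counter tokens :=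
  PySem.Dict.foldl_insert_getD_add_one_eq_counter tokens

lemma pvDistinct_eq (tokens : List String) :
    pvDistinct tokens = PySem.List.sorted (PySem.Set.ofList tokens) (fun x => x) := by
  unfold pvDistinct
  rw [pvCount_eq, PySem.Dict.keys_counter]

lemma pvDistinct_pairwise (tokens : List String) :
    (pvDistinct tokens).Pairwise (· < ·) := by
  rw [pvDistinct_eq]
  exact PySem.List.sorted_ofList_pairwise_lt tokens

lemma pvDistinct_mem (tokens : List String) (x : String) :
    x ∈ pvDistinct tokens ↔ x ∈ tokens := by
  rw [pvDistinct_eq, PySem.List.mem_sorted, PySem.Set.mem_ofList]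

-- B's keep-condition at position k0 of distinct, unfolded
lemma pvKeepCond_iff (tokens : List String) (k0 : Nat) (hk0 : k0 < (pvDistinct tokens).length) :
    pvKeepCond (pvCount tokens) (pvDistinct tokens) ((k0 : Int), (pvDistinct tokens)[k0]) = true ↔
      tokens.count (pvDistinct tokens)[k0] = 1 ∧
        ¬ ∃ h : k0 + 1 < (pvDistinct tokens).length,
            (pvDistinct tokens)[k0].toList <+: ((pvDistinct tokens)[k0 + 1]'h).toList := by
  unfold pvKeepCond
  rw [pvCount_eq, PySem.Dict.getD_counter]
  by_cases hlt : k0 + 1 < (pvDistinct tokens).length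
  · have hget : PySem.List.pyGetD (pvDistinct tokens) ((k0 : Int) + 1) "" =
        (pvDistinct tokens)[k0 + 1]'hlt := by
      have h := PySem.List.pyGetD_eq_getElem (pvDistinct tokens) (i := (k0 : Int) + 1) ""
        (by positivity) (by exact_mod_cast hlt)
      simpa using h
    have hd : decide ((k0 : Int) + 1 < PySem.List.len (pvDistinct tokens)) = true := by
      simp only [PySem.List.len, decide_eq_true_eq]
      omega
    rw [hget, hd, Bool.true_and]
    rcases Bool.eq_false_or_eq_true (PySem.Str.startswith ((pvDistinct tokens)[k0 + 1]'hlt)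
        ((pvDistinct tokens)[k0])) with hsw | hsw
    · rw [hsw, Bool.not_true, Bool.and_false]
      rw [PySem.Str.startswith_eq] at hsw
      constructor
      · intro h
        cases h
      · rintro ⟨h1, h2⟩
        exfalso
        exact h2 ⟨hlt, (PySem.Chars.startswith_iff _ _).mp hsw⟩
    · rw [hsw, Bool.not_false, Bool.and_true]
      rw [PySem.Str.startswith_eq] at hsw
      constructor
      · intro h1
        refine ⟨by exact_mod_cast (beq_iff_eq.mp h1), ?_⟩
        rintro ⟨h, hpre⟩
        have := (PySem.Chars.startswith_iff _ _).mpr hpre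
        rw [this] at hsw
        cases hsw
      · rintro ⟨h1, -⟩
        simp only [beq_iff_eq]
        exact_mod_cast h1
  · have hd : decide ((k0 : Int) + 1 < PySem.List.len (pvDistinct tokens)) = false := by
      simp only [PySem.List.len, decide_eq_false_iff_not, not_lt]
      omega
    rw [hd, Bool.false_and, Bool.not_false, Bool.and_true]
    simp only [beq_iff_eq]
    constructor
    · intro h1
      exact ⟨by exact_mod_cast h1, by rintro ⟨h, -⟩; exact hlt h⟩
    · rintro ⟨h1, -⟩
      exact_mod_cast h1

-- strings: prefix + distinct gives strict lexicographic order
lemma pvStr_lt_of_prefix {t u : String} (hp : t.toList <+: u.toList) (hne : u ≠ t) : t < u := by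
  rw [String.lt_iff_toList_lt]
  exact (List.lt_iff_lex_lt _ _).mpr
    (pvPrefix_lex hp (fun h => hne (String.toList_inj.mp h.symm)))

lemma pvStr_lex_of_lt {t u : String} (h : t < u) : List.Lex (· < ·) t.toList u.toList := by
  rw [String.lt_iff_toList_lt] at h
  exact (List.lt_iff_lex_lt _ _).mp h

-- the heart: membership in keep is exactly non-collision (for tokens of the list)
lemma pvKeep_iff (tokens : List String) (t : String) (ht : t ∈ tokens) :
    t ∈ pvKeep tokens ↔ ¬ pvColl tokens t := by
  have hpair := pvDistinct_pairwise tokens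
  have hpg := List.pairwise_iff_getElem.mp hpair
  have hnd : (pvDistinct tokens).Nodup := hpair.imp (fun h => ne_of_lt h)
  have hmem : ∀ x, x ∈ pvDistinct tokens ↔ x ∈ tokens := pvDistinct_mem tokens
  have hkeep : t ∈ pvKeep tokens ↔
      ∃ k0, ∃ hk0 : k0 < (pvDistinct tokens).length,
        (pvDistinct tokens)[k0] = t ∧
        pvKeepCond (pvCount tokens) (pvDistinct tokens) ((k0 : Int), (pvDistinct tokens)[k0]) = true := by
    unfold pvKeep
    rw [pvMem_foldl_add_if]
    constructor
    · rintro (h | ⟨p, hp, hq, hpt⟩)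
      · simp [PySem.Set.empty] at h
      · obtain ⟨k0, hk0, rfl⟩ := (PySem.List.mem_enumerate_iff _ _ _).mp hp
        refine ⟨k0, hk0, by simpa using hpt, ?_⟩
        simpa using hq
    · rintro ⟨k0, hk0, hvt, hq⟩
      refine Or.inr ⟨((k0 : Int), (pvDistinct tokens)[k0]), ?_, hq, hvt⟩
      rw [PySem.List.mem_enumerate_iff]
      exact ⟨k0, hk0, by simp⟩
  rw [hkeep]
  constructor
  · rintro ⟨k0, hk0, hvt, hq⟩
    rw [pvKeepCond_iff tokens k0 hk0] at hq
    obtain ⟨hcnt, hsucc⟩ := hq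
    subst hvt
    rintro (hc | ⟨u, hu, hne, hpre⟩)
    · omega
    · obtain ⟨q, hqlen, hqv⟩ := List.mem_iff_getElem.mp ((hmem u).mpr hu)
      subst hqv
      have htu : (pvDistinct tokens)[k0] < (pvDistinct tokens)[q] :=
        pvStr_lt_of_prefix hpre hne
      have hk0q : k0 < q := by
        rcases Nat.lt_trichotomy k0 q with h | h | h
        · exact h
        · subst h
          exact absurd rfl hne
        · exact absurd (hpg q k0 hqlen hk0 h) (lt_asymm htu)
      apply hsucc
      have hk1 : k0 + 1 < (pvDistinct tokens).length := by omega
      refine ⟨hk1, ?_⟩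
      rcases Nat.eq_or_lt_of_le hk0q with h | h
      · have hq1 : k0 + 1 = q := h
        subst hq1
        exact hpre
      · have hlt1 := hpg k0 (k0 + 1) hk0 hk1 (by omega)
        have hlt2 := hpg (k0 + 1) q hk1 hqlen h
        exact pvPrefix_between (pvStr_lex_of_lt hlt1) (pvStr_lex_of_lt hlt2) hpre
  · intro hnc
    obtain ⟨k0, hk0, hvt⟩ := List.mem_iff_getElem.mp ((hmem t).mpr ht)
    subst hvt
    refine ⟨k0, hk0, rfl, ?_⟩
    rw [pvKeepCond_iff tokens k0 hk0]
    have hpos : 0 < tokens.count (pvDistinct tokens)[k0] := List.count_pos_iff.mpr ht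
    have hle : ¬ 1 < tokens.count (pvDistinct tokens)[k0] := fun h => hnc (Or.inl h)
    refine ⟨by omega, ?_⟩
    rintro ⟨hk1, hpre⟩
    have hlt1 := hpg k0 (k0 + 1) hk0 hk1 (by omega)
    exact hnc (Or.inr ⟨(pvDistinct tokens)[k0 + 1]'hk1,
      (hmem _).mp (List.getElem_mem hk1), ne_of_gt hlt1, hpre⟩)

-- A-side condition at an in-range integer index, phrased over Nat indices
lemma pvA_exists_iff (tokens : List String) (k : Nat) (hk : k < tokens.length) :
    (∃ j ∈ PySem.List.pyRange 0 (PySem.List.len tokens) 1, (k : Int) ≠ j ∧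
        PySem.Str.startswith (PySem.List.pyGetD tokens j "")
          (PySem.List.pyGetD tokens (k : Int) "") = true) ↔
      ∃ j, ∃ hj : j < tokens.length, j ≠ k ∧ tokens[k].toList <+: tokens[j].toList := by
  have hgetk : PySem.List.pyGetD tokens (k : Int) "" = tokens[k] := by
    have h := PySem.List.pyGetD_eq_getElem tokens (i := (k : Int)) ""
      (by positivity) (by exact_mod_cast hk)
    simpa using h
  constructor
  · rintro ⟨j, hjr, hjk, hs⟩
    rw [PySem.List.mem_pyRange_one] at hjr
    obtain ⟨hj0, hjn⟩ := hjr
    obtain ⟨j', rfl⟩ : ∃ j' : Nat, j = (j' : Int) := ⟨j.toNat, by omega⟩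
    simp only [PySem.List.len] at hjn
    have hjlen : j' < tokens.length := by exact_mod_cast hjn
    have hgetj : PySem.List.pyGetD tokens (j' : Int) "" = tokens[j'] := by
      have h := PySem.List.pyGetD_eq_getElem tokens (i := (j' : Int)) ""
        (by positivity) (by exact_mod_cast hjlen)
      simpa using h
    refine ⟨j', hjlen, by omega, ?_⟩
    rw [hgetk, hgetj, PySem.Str.startswith_eq] at hs
    exact (PySem.Chars.startswith_iff _ _).mp hs
  · rintro ⟨j, hj, hjk, hpre⟩
    have hgetj : PySem.List.pyGetD tokens (j : Int) "" = tokens[j] := by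
      have h := PySem.List.pyGetD_eq_getElem tokens (i := (j : Int)) ""
        (by positivity) (by exact_mod_cast hj)
      simpa using h
    refine ⟨(j : Int), ?_, by omega, ?_⟩
    · rw [PySem.List.mem_pyRange_one]
      simp only [PySem.List.len]
      omega
    · rw [hgetk, hgetj, PySem.Str.startswith_eq]
      exact (PySem.Chars.startswith_iff _ _).mpr hpre

-- pointwise: A's per-index test equals B's membership test
lemma pvPointwise (tokens : List String) (i : Int) (h0 : 0 ≤ i) (h1 : i < tokens.length) :
    (!pvInnerA tokens i (PySem.List.pyRange 0 (PySem.List.len tokens) 1)) =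
      PySem.Set.contains (pvKeep tokens) (PySem.List.pyGetD tokens i "") := by
  obtain ⟨k, rfl⟩ : ∃ k : Nat, i = (k : Int) := ⟨i.toNat, by omega⟩
  have hk : k < tokens.length := by exact_mod_cast h1
  have hget : PySem.List.pyGetD tokens (k : Int) "" = tokens[k] := by
    have h := PySem.List.pyGetD_eq_getElem tokens (i := (k : Int)) "" h0 (by exact_mod_cast h1)
    simpa using h
  have hx := pvInnerA_iff tokens (k : Int) (PySem.List.pyRange 0 (PySem.List.len tokens) 1)
  rw [pvA_exists_iff tokens k hk, pvExists_index_iff tokens k hk] at hx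
  rw [Bool.eq_iff_iff, Bool.not_eq_true', PySem.Set.contains_iff, hget,
    pvKeep_iff tokens _ (List.getElem_mem hk), ← hx]
  simp

-- the two ports agree
lemma pvMain (tokens : List String) : resolve_collision tokens = resolve_collision_alt tokens := by
  unfold resolve_collision resolve_collision_alt
  have hA : (fun (indices : List Int) i =>
      if pvInnerA tokens i (PySem.List.pyRange 0 (PySem.List.len tokens) 1) then indices
      else indices ++ [i]) =
      (fun (indices : List Int) i =>
        if (!pvInnerA tokens i (PySem.List.pyRange 0 (PySem.List.len tokens) 1)) = true then
          indices ++ [i]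
        else indices) := by
    funext indices i
    cases h : pvInnerA tokens i (PySem.List.pyRange 0 (PySem.List.len tokens) 1) <;> simp
  rw [hA, PySem.List.foldl_append_if_eq_filter]
  rw [PySem.List.foldl_append_if
    (p := fun p : Int × String => PySem.Set.contains (pvKeep tokens) p.2) (f := Prod.fst)]
  rw [PySem.List.enumerate_eq_map_pyRange tokens "", List.filter_map, List.map_map]
  simp only [List.nil_append, Function.comp_def]
  rw [show (fun j => ((j : Int), PySem.List.pyGetD tokens j "").1) = fun j : Int => j from rfl]
  rw [List.map_id']
  apply List.filter_congr
  intro i hi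
  rw [PySem.List.mem_pyRange_one] at hi
  simp only [PySem.List.len] at hi
  exact pvPointwise tokens i hi.1 (by exact_mod_cast hi.2)

-- ===== VERDICT (by name: the statement is the Claim_ definition above) =====
theorem resolve_collision_spec : Claim_equal_resolve_collision := by
  intro tokens _
  unfold Spec_resolve_collision
  exact pvMain tokens
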